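-- pv_equiv track=rewrite | github.com/robertinglin/contextforge | contextforge/commit/patch.py | _flatten_ws_outside_quotes
-- ===== SOURCE A (Python) =====
-- def _flatten_ws_outside_quotes(text: str) -> str:
--     """
--     Remove comments and *all* whitespace (spaces/tabs/newlines) from a code block,
--     including inside string literals. Supports single (' / ") and triple (''' / \"\"\")
--     quotes and strips '#' and '//' comments when not inside a string.
--     Escapes inside strings are preserved.
--     """
--     out: list[str] = []
--     i, n = 0, len(text)
--     q: str | None = None  # None | "'" | '"' | "'''" | '"""'
--
--     def starts_with(s: str) -> bool:
--         return text.startswith(s, i)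
--
--     while i < n:
--         if q is None:
--             # Handle comments (only when not inside a string)
--             if starts_with("//"):
--                 # Skip to end of line
--                 while i < n and text[i] != "\n":
--                     i += 1
--                 # We drop the newline too because we flatten all whitespace anyway
--                 i += 1 if i < n else 0
--                 continue
--             if text[i] == "#":
--                 while i < n and text[i] != "\n":
--                     i += 1
--                 i += 1 if i < n else 0
--                 continue
--
--             # Enter string mode (triple quotes first)
--             if starts_with("'''"):
--                 q = "'''"
--                 out.extend(["'", "'", "'"])
--                 i += 3
--                 continue
--             if starts_with('"""'):
--                 q = '"""'
--                 out.extend(['"', '"', '"'])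
--                 i += 3
--                 continue
--             if text[i] in ("'", '"'):
--                 q = text[i]
--                 out.append(text[i])
--                 i += 1
--                 continue
--
--             # Outside any string: drop whitespace, keep non-whitespace
--             ch = text[i]
--             if ch not in (" ", "\t", "\r", "\n"):
--                 out.append(ch)
--             i += 1
--         else:
--             # Inside a string: preserve escapes and quotes, drop whitespace
--             if q in ("'''", '"""'):
--                 if starts_with(q):
--                     out.extend(list(q))
--                     i += 3
--                     q = None
--                     continue
--                 ch = text[i]
--                 if ch == "\\" and i + 1 < n:
--                     out.append("\\")
--                     out.append(text[i + 1])
--                     i += 2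
--                     continue
--                 if ch not in (" ", "\t", "\r", "\n"):
--                     out.append(ch)
--                 i += 1
--             else:
--                 ch = text[i]
--                 if ch == "\\" and i + 1 < n:
--                     out.append("\\")
--                     out.append(text[i + 1])
--                     i += 2
--                     continue
--                 if ch == q:
--                     out.append(ch)
--                     q = None
--                     i += 1
--                     continue
--                 if ch not in (" ", "\t", "\r", "\n"):
--                     out.append(ch)
--                 i += 1
--
--     return "".join(out)
-- ===== SOURCE B (Python) =====
-- def _flatten_ws_outside_quotes(text: str) -> str:
--     """Two-stage pipeline: tokenize the text into code/string segments
--     (comments are dropped by the tokenizer), then emit each segment -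
--     plain whitespace filter for code, escape-aware whitespace strip for
--     string segments - and join the results."""
--     parts = []
--     for is_str, seg in _tokenize(text):
--         if is_str:
--             parts.append(_strip_escape_aware(seg))
--         else:
--             parts.append("".join(c for c in seg if c not in " \t\r\n"))
--     return "".join(parts)
--
--
-- def _quote_at(text: str, i: int):
--     for q in ("'''", '"""', "'", '"'):
--         if text.startswith(q, i):
--             return q
--     return None
--
--
-- def _scan_string(text: str, i: int, quote: str) -> int:
--     """Index just past the closing quote (or len(text) if unterminated)."""
--     n = len(text)
--     while i < n:
--         if text.startswith(quote, i):
--             return i + len(quote)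
--         if text[i] == "\\" and i + 1 < n:
--             i += 2
--         else:
--             i += 1
--     return n
--
--
-- def _tokenize(text: str):
--     """Split text into (is_string, raw_segment) tokens; comments vanish here."""
--     n = len(text)
--     toks = []
--     i = 0
--     while i < n:
--         if text.startswith("//", i) or text[i] == "#":
--             while i < n and text[i] != "\n":
--                 i += 1
--             if i < n:
--                 i += 1
--             continue
--         q = _quote_at(text, i)
--         if q is not None:
--             j = _scan_string(text, i + len(q), q)
--             toks.append((True, text[i:j]))
--             i = j
--             continue
--         j = i
--         while j < n and not (text.startswith("//", j) or text[j] == "#"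
--                              or _quote_at(text, j) is not None):
--             j += 1
--         toks.append((False, text[i:j]))
--         i = j
--     return toks
--
--
-- def _strip_escape_aware(seg: str) -> str:
--     out = []
--     i, m = 0, len(seg)
--     while i < m:
--         c = seg[i]
--         if c == "\\" and i + 1 < m:
--             out.append(seg[i:i + 2])
--             i += 2
--         elif c in " \t\r\n":
--             i += 1
--         else:
--             out.append(c)
--             i += 1
--     return "".join(out)
-- ===== Notes on version B (the rewrite author's own statement) =====
-- stated objective: alternative
-- what changed: A is one fused state machine that threads an in-string quote flag through a single character loop; B is a two-stage pipeline: a tokenizer first splits the text into raw code/string segments (dropping comments entirely), then a separate emit stage maps each segment to output (plain whitespace filter for code, escape-aware whitespace strip for strings) and joins the parts.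
import Mathlib
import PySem

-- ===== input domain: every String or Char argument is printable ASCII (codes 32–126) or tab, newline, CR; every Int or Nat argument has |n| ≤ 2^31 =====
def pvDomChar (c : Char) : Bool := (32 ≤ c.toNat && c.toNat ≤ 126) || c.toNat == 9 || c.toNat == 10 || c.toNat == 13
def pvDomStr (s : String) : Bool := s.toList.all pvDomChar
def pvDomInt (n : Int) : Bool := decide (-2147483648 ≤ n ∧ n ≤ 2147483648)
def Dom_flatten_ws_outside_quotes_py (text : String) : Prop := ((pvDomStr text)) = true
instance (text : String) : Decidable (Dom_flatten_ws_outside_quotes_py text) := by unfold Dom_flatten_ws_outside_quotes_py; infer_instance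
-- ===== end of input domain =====

-- B replaces A's fused state machine by a two-stage pipeline: a tokenizer that
-- splits the text into code/string segments (dropping comments), then a per-segment
-- whitespace emitter (objective: alternative; same cost).

-- ===== PORT A =====
-- whitespace test: ch in (" ", "\t", "\r", "\n")
def pvIsWS (c : Char) : Bool := c = ' ' || c = '\t' || c = '\r' || c = '\n'

-- comment skip: skip to '\n', then one more if any (identical in A and in Source B's tokenizer)
def pvSkipLineA (l : List Char) : List Char :=
  (l.dropWhile (· != '\n')).drop 1

theorem pvSkipLineA_len (c : Char) (rest : List Char) :
    (pvSkipLineA (c :: rest)).length ≤ rest.length := by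
  unfold pvSkipLineA
  rw [List.dropWhile_cons]
  by_cases hc : c = '\n'
  · simp [hc]
  · have := List.length_dropWhile_le (· != '\n') rest
    simp [hc, List.length_drop]
    omega

-- state machine of A over the remaining characters; q is the open quote (None | ' | " | ''' | """)
def pvGoA : List Char → Option (List Char) → List Char
  | [], _ => []
  | c :: rest, none =>
    if (c :: rest).take 2 = ['/', '/'] then pvGoA (pvSkipLineA (c :: rest)) none
    else if c = '#' then pvGoA (pvSkipLineA (c :: rest)) none
    else if (c :: rest).take 3 = ['\'', '\'', '\''] then
      '\'' :: '\'' :: '\'' :: pvGoA ((c :: rest).drop 3) (some ['\'', '\'', '\''])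
    else if (c :: rest).take 3 = ['"', '"', '"'] then
      '"' :: '"' :: '"' :: pvGoA ((c :: rest).drop 3) (some ['"', '"', '"'])
    else if c = '\'' ∨ c = '"' then c :: pvGoA rest (some [c])
    else if pvIsWS c then pvGoA rest none
    else c :: pvGoA rest none
  | c :: rest, some q =>
    if q.length = 3 then
      if (c :: rest).take 3 = q then q ++ pvGoA ((c :: rest).drop 3) none
      else match c, rest with
        | '\\', d :: rest' => '\\' :: d :: pvGoA rest' (some q)
        | c', r => (if pvIsWS c' then [] else [c']) ++ pvGoA r (some q)
    else
      match c, rest with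
      | '\\', d :: rest' => '\\' :: d :: pvGoA rest' (some q)
      | c', r =>
        if [c'] = q then c' :: pvGoA r none
        else (if pvIsWS c' then [] else [c']) ++ pvGoA r (some q)
  termination_by l _ => l.length
  decreasing_by
    all_goals first
      | (have := pvSkipLineA_len c rest; simp; omega)
      | (simp; omega)
      | simp

def flatten_ws_outside_quotes_py (text : String) : String :=
  String.ofList (pvGoA text.toList none)

-- ===== PORT B =====
-- _quote_at: first of ''' , """ , ' , " that the suffix starts with
def pvQuoteAt (l : List Char) : Option (List Char) :=
  if l.take 3 = ['\'', '\'', '\''] then some ['\'', '\'', '\'']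
  else if l.take 3 = ['"', '"', '"'] then some ['"', '"', '"']
  else if l.take 1 = ['\''] then some ['\'']
  else if l.take 1 = ['"'] then some ['"']
  else none

-- _scan_string: raw characters up to and including the closing quote, plus the remainder
def pvScanStr (q : List Char) : List Char → List Char × List Char
  | [] => ([], [])
  | c :: rest =>
    if (c :: rest).take q.length = q then (q, (c :: rest).drop q.length)
    else match c, rest with
      | '\\', d :: rest' =>
        ('\\' :: d :: (pvScanStr q rest').1, (pvScanStr q rest').2)
      | c', r => (c' :: (pvScanStr q r).1, (pvScanStr q r).2)
  termination_by l => l.length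
  decreasing_by
    all_goals first | (simp; omega) | simp

theorem pvScanStr_len (q l : List Char) : (pvScanStr q l).2.length ≤ l.length := by
  fun_induction pvScanStr q l <;> simp_all <;> omega

-- the inner while-loop of the code branch: is a comment or a quote starting here?
def pvIsBoundary (c : Char) (rest : List Char) : Bool :=
  decide ((c :: rest).take 2 = ['/', '/']) || c == '#' || (pvQuoteAt (c :: rest)).isSome

-- the code-run span: characters until the next boundary, plus the remainder
def pvCodeRun : List Char → List Char × List Char
  | [] => ([], [])
  | c :: rest =>
    if pvIsBoundary c rest then ([], c :: rest)
    else (c :: (pvCodeRun rest).1, (pvCodeRun rest).2)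

theorem pvCodeRun_len (l : List Char) : (pvCodeRun l).2.length ≤ l.length := by
  induction l with
  | nil => simp [pvCodeRun]
  | cons c rest ih => rw [pvCodeRun]; split <;> simp <;> omega

-- _tokenize: (is_string, raw segment) list; comments vanish here
def pvTok : List Char → List (Bool × List Char)
  | [] => []
  | c :: rest =>
    if (c :: rest).take 2 = ['/', '/'] ∨ c = '#' then pvTok (pvSkipLineA (c :: rest))
    else match hq : pvQuoteAt (c :: rest) with
      | some q =>
        (true, q ++ (pvScanStr q ((c :: rest).drop q.length)).1)
          :: pvTok (pvScanStr q ((c :: rest).drop q.length)).2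
      | none =>
        (false, (pvCodeRun (c :: rest)).1) :: pvTok (pvCodeRun (c :: rest)).2
  termination_by l => l.length
  decreasing_by
    · have := pvSkipLineA_len c rest; simp; omega
    · have h2 := pvScanStr_len q ((c :: rest).drop q.length)
      have h3 : 1 ≤ q.length := by
        unfold pvQuoteAt at hq
        split_ifs at hq <;> cases hq <;> simp
      simp only [List.length_drop, List.length_cons] at h2 ⊢
      omega
    · have h1 := pvCodeRun_len rest
      have hb : pvIsBoundary c rest = false := by
        unfold pvIsBoundary; simp_all
      rw [pvCodeRun, if_neg (by simp [hb])]
      simp; omega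

-- _strip_escape_aware: drop whitespace but keep backslash-escaped pairs intact
def pvStripEsc : List Char → List Char
  | [] => []
  | c :: rest =>
    match c, rest with
    | '\\', d :: rest' => '\\' :: d :: pvStripEsc rest'
    | c', r => (if pvIsWS c' then [] else [c']) ++ pvStripEsc r

-- the emit stage + join
def pvEmit (toks : List (Bool × List Char)) : List Char :=
  toks.flatMap (fun t => if t.1 then pvStripEsc t.2 else t.2.filter (fun c => !pvIsWS c))

def flatten_ws_outside_quotes_py_alt (text : String) : String :=
  String.ofList (pvEmit (pvTok text.toList))

-- ===== PRECONDITION & SPEC =====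
def Spec_flatten_ws_outside_quotes_py (text : String) (out : String) : Prop := out = flatten_ws_outside_quotes_py_alt text
instance (text : String) (out : String) : Decidable (Spec_flatten_ws_outside_quotes_py text out) := by unfold Spec_flatten_ws_outside_quotes_py; infer_instance

-- ===== CLAIM (what is proved, stated in full; the proofs are below) =====
def Claim_equal_flatten_ws_outside_quotes_py : Prop := ∀ (text : String), Dom_flatten_ws_outside_quotes_py text → Spec_flatten_ws_outside_quotes_py text (flatten_ws_outside_quotes_py text)

-- ===== LEMMAS AND PROOFS =====

theorem pvTok_cons (c : Char) (rest : List Char) :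
    pvTok (c :: rest) =
      if (c :: rest).take 2 = ['/', '/'] ∨ c = '#' then pvTok (pvSkipLineA (c :: rest))
      else match pvQuoteAt (c :: rest) with
        | some q =>
          (true, q ++ (pvScanStr q ((c :: rest).drop q.length)).1)
            :: pvTok (pvScanStr q ((c :: rest).drop q.length)).2
        | none =>
          (false, (pvCodeRun (c :: rest)).1) :: pvTok (pvCodeRun (c :: rest)).2 := by
  rw [pvTok]
  rcases hq : pvQuoteAt (c :: rest) with _ | q <;> simp [hq]

theorem pvTake3 (c : Char) (r : List Char) : (c :: r).take 3 = c :: r.take 2 := rfl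

theorem pvTake1 (c : Char) (r : List Char) : (c :: r).take 1 = [c] := rfl

theorem pvQA_t1 (c : Char) (rest : List Char) (h : (c :: rest).take 3 = ['\'', '\'', '\'']) :
    pvQuoteAt (c :: rest) = some ['\'', '\'', '\''] := by
  simp [pvQuoteAt, h]

theorem pvQA_t2 (c : Char) (rest : List Char) (h1 : ¬(c :: rest).take 3 = ['\'', '\'', '\''])
    (h2 : (c :: rest).take 3 = ['"', '"', '"']) :
    pvQuoteAt (c :: rest) = some ['"', '"', '"'] := by
  simp [pvQuoteAt, h1, h2]

theorem pvQA_s1 (c : Char) (rest : List Char) (h1 : ¬(c :: rest).take 3 = ['\'', '\'', '\''])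
    (hc : c = '\'') : pvQuoteAt (c :: rest) = some ['\''] := by
  rw [pvTake3] at h1
  subst hc
  simp_all [pvQuoteAt, pvTake3, pvTake1]

theorem pvQA_s2 (c : Char) (rest : List Char) (h2 : ¬(c :: rest).take 3 = ['"', '"', '"'])
    (hc : c = '"') : pvQuoteAt (c :: rest) = some ['"'] := by
  rw [pvTake3] at h2
  subst hc
  simp_all [pvQuoteAt, pvTake3, pvTake1]

theorem pvQA_none (c : Char) (rest : List Char) (hc1 : ¬c = '\'') (hc2 : ¬c = '"') :
    pvQuoteAt (c :: rest) = none := by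
  simp [pvQuoteAt, pvTake3, pvTake1, hc1, hc2]

theorem pvBoundary_false (c : Char) (rest : List Char) (h1 : ¬(c :: rest).take 2 = ['/', '/'])
    (h2 : ¬c = '#') (h3 : pvQuoteAt (c :: rest) = none) : pvIsBoundary c rest = false := by
  simp [pvIsBoundary, h2, h3]
  intro hcc hr
  exact h1 (by rw [List.take_succ_cons, hcc, hr])

theorem pvStripEsc_cons (c : Char) (rest : List Char) (hc : ¬c = '\\') :
    pvStripEsc (c :: rest) = (if pvIsWS c then [] else [c]) ++ pvStripEsc rest := by
  rw [pvStripEsc.eq_3 _ _ (by intro d r h' _; exact hc h')]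

@[simp] theorem pvStripEsc_nil : pvStripEsc [] = [] := rfl

@[simp] theorem pvStripEsc_sq (rest : List Char) :
    pvStripEsc ('\'' :: rest) = '\'' :: pvStripEsc rest := by
  rw [pvStripEsc_cons _ _ (by decide)]; simp [pvIsWS]

@[simp] theorem pvStripEsc_dq (rest : List Char) :
    pvStripEsc ('"' :: rest) = '"' :: pvStripEsc rest := by
  rw [pvStripEsc_cons _ _ (by decide)]; simp [pvIsWS]

theorem pvStripEsc_q (q : List Char)
    (hq : q ∈ [['\'', '\'', '\''], ['"', '"', '"'], ['\''], ['"']]) (body : List Char) :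
    pvStripEsc (q ++ body) = q ++ pvStripEsc body := by
  fin_cases hq <;>
    simp [pvStripEsc_cons, pvIsWS, List.cons_append, List.nil_append]

theorem pvEmit_cons (t : Bool × List Char) (ts : List (Bool × List Char)) :
    pvEmit (t :: ts) =
      (if t.1 then pvStripEsc t.2 else t.2.filter (fun c => !pvIsWS c)) ++ pvEmit ts := by
  simp [pvEmit]

-- the emit of a tokenization starts with the code run's filtered characters
theorem pvEmit_codeRun (l : List Char) :
    pvEmit (pvTok l) =
      (pvCodeRun l).1.filter (fun c => !pvIsWS c) ++ pvEmit (pvTok (pvCodeRun l).2) := by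
  cases l with
  | nil => simp [pvCodeRun, pvTok, pvEmit]
  | cons c rest =>
    by_cases hb : pvIsBoundary c rest = true
    · rw [pvCodeRun, if_pos hb]
      simp
    · have hb' : pvIsBoundary c rest = false := by simpa using hb
      have h1 : ¬(c :: rest).take 2 = ['/', '/'] := by
        intro h; simp [pvIsBoundary, h] at hb'
      have h2 : ¬c = '#' := by
        intro h; simp [pvIsBoundary, h] at hb'
      have h3 : pvQuoteAt (c :: rest) = none := by
        rcases h : pvQuoteAt (c :: rest) with _ | q
        · rfl
        · simp [pvIsBoundary, h] at hb'
      rw [pvTok_cons, if_neg (not_or.mpr ⟨h1, h2⟩), h3, pvEmit_cons]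
      simp

theorem pvMain : ∀ (n : Nat) (l : List Char), l.length ≤ n →
    (pvGoA l none = pvEmit (pvTok l)) ∧
    (∀ q, q ∈ [['\'', '\'', '\''], ['"', '"', '"'], ['\''], ['"']] →
      pvGoA l (some q) =
        pvStripEsc (pvScanStr q l).1 ++ pvEmit (pvTok (pvScanStr q l).2)) := by
  intro n
  induction n with
  | zero =>
    intro l hl
    have hnil : l = [] := by cases l <;> simp_all
    subst hnil
    exact ⟨by simp [pvGoA, pvTok, pvEmit], fun q _ => by simp [pvGoA, pvTok, pvScanStr, pvEmit, pvStripEsc]⟩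
  | succ n ih =>
    intro l hl
    cases l with
    | nil => exact ⟨by simp [pvGoA, pvTok, pvEmit], fun q _ => by simp [pvGoA, pvTok, pvScanStr, pvEmit, pvStripEsc]⟩
    | cons c rest =>
      simp only [List.length_cons, Nat.add_le_add_iff_right] at hl
      refine ⟨?_, ?_⟩
      · -- code mode
        rw [pvTok_cons]
        simp only [pvGoA]
        by_cases h1 : (c :: rest).take 2 = ['/', '/']
        · have hs := pvSkipLineA_len c rest
          rw [if_pos h1, if_pos (Or.inl h1)]
          exact (ih _ (by omega)).1
        · rw [if_neg h1]
          by_cases h2 : c = '#'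
          · have hs := pvSkipLineA_len c rest
            rw [if_pos h2, if_pos (Or.inr h2)]
            exact (ih _ (by omega)).1
          · rw [if_neg h2, if_neg (not_or.mpr ⟨h1, h2⟩)]
            by_cases h3 : (c :: rest).take 3 = ['\'', '\'', '\'']
            · rw [if_pos h3, pvQA_t1 c rest h3]
              have := (ih (rest.drop 2) (by simp; omega)).2 ['\'', '\'', '\''] (by simp)
              simp [pvEmit_cons, pvStripEsc_q ['\'', '\'', '\''] (by simp), this]
            · rw [if_neg h3]
              by_cases h4 : (c :: rest).take 3 = ['"', '"', '"']
              · rw [if_pos h4, pvQA_t2 c rest h3 h4]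
                have := (ih (rest.drop 2) (by simp; omega)).2 ['"', '"', '"'] (by simp)
                simp [pvEmit_cons, pvStripEsc_q ['"', '"', '"'] (by simp), this]
              · rw [if_neg h4]
                by_cases h5 : c = '\'' ∨ c = '"'
                · rw [if_pos h5]
                  rcases h5 with h5 | h5
                  · rw [pvQA_s1 c rest h3 h5]
                    have := (ih rest hl).2 ['\''] (by simp)
                    subst h5
                    simpa [pvEmit_cons, pvStripEsc_q ['\''] (by simp)] using this
                  · rw [pvQA_s2 c rest h4 h5]
                    have := (ih rest hl).2 ['"'] (by simp)
                    subst h5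
                    simpa [pvEmit_cons, pvStripEsc_q ['"'] (by simp)] using this
                · rw [if_neg h5, pvQA_none c rest (fun h => h5 (Or.inl h)) (fun h => h5 (Or.inr h))]
                  have hib : pvIsBoundary c rest = false :=
                    pvBoundary_false c rest h1 h2
                      (pvQA_none c rest (fun h => h5 (Or.inl h)) (fun h => h5 (Or.inr h)))
                  have hrun := pvEmit_codeRun rest
                  have hih := (ih rest hl).1
                  rw [pvEmit_cons]
                  simp only [pvCodeRun, hib, if_false, Bool.false_eq_true]
                  by_cases h6 : pvIsWS c = true <;>
                    simp [h6, hih, hrun, List.filter_cons]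
      · -- string mode
        intro q hq
        have hq4 : q = ['\'', '\'', '\''] ∨ q = ['"', '"', '"'] ∨ q = ['\''] ∨ q = ['"'] := by
          simpa using hq
        rcases hq4 with rfl | rfl | rfl | rfl
        · -- q = '''
          by_cases hc : c = '\\'
          · subst hc
            cases rest with
            | nil =>
              rw [pvGoA.eq_4 _ _ _ (by intro d r _ hr; simp at hr),
                  pvScanStr.eq_3 _ _ _ (by intro d r _ hr; simp at hr)]
              simp [pvGoA, pvScanStr, pvTok, pvEmit, pvStripEsc, pvIsWS]
            | cons d rest' =>
              rw [pvGoA.eq_3, pvScanStr.eq_2]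
              have := (ih rest' (by simp at hl; omega)).2 ['\'', '\'', '\''] (by simp)
              simp [this, pvStripEsc]
          · rw [pvGoA.eq_4 _ _ _ (by intro d r h' _; exact hc h'),
                pvScanStr.eq_3 _ _ _ (by intro d r h' _; exact hc h')]
            by_cases hclose : (c :: rest).take 3 = ['\'', '\'', '\'']
            · have := (ih (rest.drop 2) (by simp; omega)).1
              simp [hclose, this]
            · have hclose' : ¬(c = '\'' ∧ rest.take 2 = ['\'', '\'']) := by
                simpa [List.take_succ_cons] using hclose
              have := (ih rest hl).2 ['\'', '\'', '\''] (by simp)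
              simp [hclose', this, pvStripEsc_cons c _ hc, List.append_assoc]
        · -- q = three double quotes
          by_cases hc : c = '\\'
          · subst hc
            cases rest with
            | nil =>
              rw [pvGoA.eq_4 _ _ _ (by intro d r _ hr; simp at hr),
                  pvScanStr.eq_3 _ _ _ (by intro d r _ hr; simp at hr)]
              simp [pvGoA, pvScanStr, pvTok, pvEmit, pvStripEsc, pvIsWS]
            | cons d rest' =>
              rw [pvGoA.eq_3, pvScanStr.eq_2]
              have := (ih rest' (by simp at hl; omega)).2 ['"', '"', '"'] (by simp)
              simp [this, pvStripEsc]
          · rw [pvGoA.eq_4 _ _ _ (by intro d r h' _; exact hc h'),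
                pvScanStr.eq_3 _ _ _ (by intro d r h' _; exact hc h')]
            by_cases hclose : (c :: rest).take 3 = ['"', '"', '"']
            · have := (ih (rest.drop 2) (by simp; omega)).1
              simp [hclose, this]
            · have hclose' : ¬(c = '"' ∧ rest.take 2 = ['"', '"']) := by
                simpa [List.take_succ_cons] using hclose
              have := (ih rest hl).2 ['"', '"', '"'] (by simp)
              simp [hclose', this, pvStripEsc_cons c _ hc, List.append_assoc]
        · -- q = '
          by_cases hc : c = '\\'
          · subst hc
            cases rest with
            | nil =>
              rw [pvGoA.eq_4 _ _ _ (by intro d r _ hr; simp at hr),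
                  pvScanStr.eq_3 _ _ _ (by intro d r _ hr; simp at hr)]
              simp [pvGoA, pvScanStr, pvTok, pvEmit, pvStripEsc, pvIsWS]
            | cons d rest' =>
              rw [pvGoA.eq_3, pvScanStr.eq_2]
              have := (ih rest' (by simp at hl; omega)).2 ['\''] (by simp)
              simp [this, pvStripEsc]
          · rw [pvGoA.eq_4 _ _ _ (by intro d r h' _; exact hc h'),
                pvScanStr.eq_3 _ _ _ (by intro d r h' _; exact hc h')]
            by_cases hq1 : c = '\''
            · have := (ih rest hl).1
              simp [hq1, this]
            · have := (ih rest hl).2 ['\''] (by simp)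
              simp [hq1, this, pvStripEsc_cons c _ hc, List.append_assoc]
        · -- q = "
          by_cases hc : c = '\\'
          · subst hc
            cases rest with
            | nil =>
              rw [pvGoA.eq_4 _ _ _ (by intro d r _ hr; simp at hr),
                  pvScanStr.eq_3 _ _ _ (by intro d r _ hr; simp at hr)]
              simp [pvGoA, pvScanStr, pvTok, pvEmit, pvStripEsc, pvIsWS]
            | cons d rest' =>
              rw [pvGoA.eq_3, pvScanStr.eq_2]
              have := (ih rest' (by simp at hl; omega)).2 ['"'] (by simp)
              simp [this, pvStripEsc]
          · rw [pvGoA.eq_4 _ _ _ (by intro d r h' _; exact hc h'),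
                pvScanStr.eq_3 _ _ _ (by intro d r h' _; exact hc h')]
            by_cases hq1 : c = '"'
            · have := (ih rest hl).1
              simp [hq1, this]
            · have := (ih rest hl).2 ['"'] (by simp)
              simp [hq1, this, pvStripEsc_cons c _ hc, List.append_assoc]

-- ===== VERDICT (by name: the statement is the Claim_ definition above) =====
theorem flatten_ws_outside_quotes_py_spec : Claim_equal_flatten_ws_outside_quotes_py := by
  intro text _
  unfold Spec_flatten_ws_outside_quotes_py flatten_ws_outside_quotes_py flatten_ws_outside_quotes_py_alt
  exact congrArg String.ofList (pvMain text.toList.length text.toList le_rfl).1
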